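-- pv_equiv track=rewrite | github.com/ohad1s/Intro_to_Python | SemB/TA10/rec.py | best_letter_in_sen_lst
-- ===== SOURCE A (Python) =====
-- def best_letter(word):
--     if len(word)==1:
--         return word[0]
--     letter= word[0]
--     rec_letter= best_letter(word[1:])
--     if letter<rec_letter:
--         return letter
--     return rec_letter
--
-- def best_letter_in_sen_lst(sen):
--     if len(sen)==1:
--         return best_letter(sen[0])
--     letter= best_letter(sen[0])
--     letter_rec= best_letter_in_sen_lst(sen[1:])
--     if letter<letter_rec:
--         return letter
--     return letter_rec
-- ===== SOURCE B (Python) =====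
-- def best_letter(word):
--     best = word[0]
--     for c in word[1:]:
--         if c < best:
--             best = c
--     return best
--
--
-- def best_letter_in_sen_lst(sen):
--     result = best_letter(sen[0])
--     for word in sen[1:]:
--         cur = best_letter(word)
--         if cur < result:
--             result = cur
--     return result
-- ===== Notes on version B (the rewrite author's own statement) =====
-- stated objective: faster
-- what changed: Replaced the recursion-with-slicing (word[1:]/sen[1:] at every step) in both helpers by single first-element-seeded accumulator loops, so each word is scanned once instead of being repeatedly copied.
import Mathlib
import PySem

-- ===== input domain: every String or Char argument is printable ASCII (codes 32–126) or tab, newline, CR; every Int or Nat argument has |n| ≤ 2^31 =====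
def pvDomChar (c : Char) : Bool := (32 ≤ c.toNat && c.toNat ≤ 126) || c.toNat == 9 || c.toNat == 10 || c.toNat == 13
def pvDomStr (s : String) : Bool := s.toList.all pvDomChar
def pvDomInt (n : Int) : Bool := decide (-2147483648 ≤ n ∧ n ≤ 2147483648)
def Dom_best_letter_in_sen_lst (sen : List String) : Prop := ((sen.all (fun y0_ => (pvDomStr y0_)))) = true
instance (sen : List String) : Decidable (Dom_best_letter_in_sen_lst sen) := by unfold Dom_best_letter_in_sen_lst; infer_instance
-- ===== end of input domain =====

-- B replaces A's recursion-with-slicing by first-element-seeded accumulator loops (one scan per word);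
-- equal on every input where A returns (Pre_ excludes the IndexError cases: empty list / empty word).

-- ===== PORT A =====
-- A's helpers return one-character Python strings and compare them with '<'; on single
-- characters Python string order is codepoint order, so the ports carry the Char and
-- wrap it into a String at the very end. The [] branches are unreachable under Pre_.
def bestLetterA : List Char → Char
  | [] => ' '                                  -- Python raises IndexError here (excluded by Pre_)
  | [c] => c                                   -- if len(word)==1: return word[0]
  | c :: rest =>                               -- letter = word[0]; rec on word[1:]
      let r := bestLetterA rest
      if c < r then c else r

def bestSenA : List String → Char
  | [] => ' '                                  -- Python raises IndexError here (excluded by Pre_)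
  | [w] => bestLetterA w.toList                -- if len(sen)==1: return best_letter(sen[0])
  | w :: rest =>
      let l := bestLetterA w.toList
      let r := bestSenA rest
      if l < r then l else r

def best_letter_in_sen_lst (sen : List String) : String :=
  String.ofList [bestSenA sen]

-- ===== PORT B =====
def bestLetterB (word : List Char) : Char :=
  match word with
  | [] => ' '                                  -- Python raises IndexError here (excluded by Pre_)
  | c :: cs => cs.foldl (fun best x => if x < best then x else best) c

def best_letter_in_sen_lst_alt (sen : List String) : String :=
  match sen with
  | [] => ""                                   -- Python raises IndexError here (excluded by Pre_)
  | w :: ws =>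
      String.ofList [ws.foldl (fun result x =>
        let cur := bestLetterB x.toList
        if cur < result then cur else result) (bestLetterB w.toList)]

-- ===== PRECONDITION & SPEC =====
-- Pre_ excludes exactly the inputs on which A (and B) raise IndexError: the empty list
-- and any list containing an empty word.
def Pre_best_letter_in_sen_lst (sen : List String) : Prop :=
  sen ≠ [] ∧ ∀ w ∈ sen, w ≠ ""
instance (sen : List String) : Decidable (Pre_best_letter_in_sen_lst sen) := by
  unfold Pre_best_letter_in_sen_lst; infer_instance

def pvWitness_best_letter_in_sen_lst : List String := ["ba", "Cd", "z"]

def Spec_best_letter_in_sen_lst (sen : List String) (out : String) : Prop := out = best_letter_in_sen_lst_alt sen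
instance (sen : List String) (out : String) : Decidable (Spec_best_letter_in_sen_lst sen out) := by unfold Spec_best_letter_in_sen_lst; infer_instance

-- ===== CLAIM (what is proved, stated in full; the proofs are below) =====
def Claim_equal_best_letter_in_sen_lst : Prop := ∀ (sen : List String), Dom_best_letter_in_sen_lst sen → Pre_best_letter_in_sen_lst sen → Spec_best_letter_in_sen_lst sen (best_letter_in_sen_lst sen)

-- ===== LEMMAS AND PROOFS =====

theorem pv_if_lt_eq_min (b x : Char) : (if x < b then x else b) = min b x := by
  by_cases h : x < b
  · simp [h, min_def, not_le.mpr h]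
  · simp [h, min_def, not_lt.mp h]

theorem pv_foldl_min_min (cs : List Char) : ∀ a b : Char,
    cs.foldl min (min a b) = min a (cs.foldl min b) := by
  induction cs with
  | nil => intro a b; rfl
  | cons x cs ih =>
      intro a b
      simp only [List.foldl_cons, min_assoc]
      exact ih a (min b x)

theorem pv_bestLetterA_foldl (cs : List Char) : ∀ c : Char,
    bestLetterA (c :: cs) = cs.foldl min c := by
  induction cs with
  | nil => intro c; rfl
  | cons x cs ih =>
      intro c
      show (let r := bestLetterA (x :: cs); if c < r then c else r) = _
      rw [ih x, pv_if_lt_eq_min, min_comm, ← pv_foldl_min_min cs c x]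
      simp [List.foldl_cons]

theorem pv_foldl_if_min (cs : List Char) (c : Char) :
    cs.foldl (fun best x => if x < best then x else best) c = cs.foldl min c := by
  induction cs generalizing c with
  | nil => rfl
  | cons x cs ih => simp [List.foldl_cons, pv_if_lt_eq_min, ih]

theorem pv_bestLetter_eq (l : List Char) : bestLetterA l = bestLetterB l := by
  cases l with
  | nil => rfl
  | cons c cs => rw [pv_bestLetterA_foldl, bestLetterB, pv_foldl_if_min]

theorem pv_bestSenA_foldl (ws : List String) : ∀ w : String,
    bestSenA (w :: ws) = (ws.map (fun x => bestLetterA x.toList)).foldl min (bestLetterA w.toList) := by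
  induction ws with
  | nil => intro w; rfl
  | cons x ws ih =>
      intro w
      show (let l := bestLetterA w.toList; let r := bestSenA (x :: ws); if l < r then l else r) = _
      rw [ih x, pv_if_lt_eq_min, min_comm,
        ← pv_foldl_min_min (ws.map (fun x => bestLetterA x.toList)) (bestLetterA w.toList) (bestLetterA x.toList)]
      simp [List.foldl_cons]

theorem pv_outer_fold (ws : List String) : ∀ b : Char,
    (ws.map (fun x => bestLetterA x.toList)).foldl min b
      = ws.foldl (fun result x =>
          let cur := bestLetterB x.toList
          if cur < result then cur else result) b := by
  induction ws with
  | nil => intro b; rfl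
  | cons x ws ih =>
      intro b
      simp only [List.map_cons, List.foldl_cons, ← pv_bestLetter_eq, pv_if_lt_eq_min, ih]

-- ===== VERDICT (by name: the statement is the Claim_ definition above) =====
theorem best_letter_in_sen_lst_spec : Claim_equal_best_letter_in_sen_lst := by
  intro sen _ hpre
  unfold Spec_best_letter_in_sen_lst
  cases sen with
  | nil => exact absurd rfl hpre.1
  | cons w ws =>
      unfold best_letter_in_sen_lst best_letter_in_sen_lst_alt
      rw [pv_bestSenA_foldl, pv_outer_fold, pv_bestLetter_eq]
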